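-- pv_equiv track=rewrite | github.com/Semen4ikk/ITMO | AL Goritm/lab 1/19.py | find_value_of_numbers
-- ===== SOURCE A (Python) =====
-- import copy
--
-- def find_value_of_numbers(length_of_number):
--     previos = [4, 2, 1, 0]
--     current = [0 for _ in range(4)]
--
--     if length_of_number > 1:
--         for i in range(length_of_number - 1):
--             current[0] += previos[1] * 2 + previos[2] * 2
--             current[1] += previos[0] + previos[3] * 2
--             current[2] += previos[0]
--             current[3] += previos[1]
--             previos = copy.copy(current)
--             current = [0 for _ in range(4)]
--
--         return sum(previos)
--     else:
--         return 8
-- ===== SOURCE B (Python) =====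
-- def _mat_mul(A, B):
--     return tuple(tuple(sum(A[i][k] * B[k][j] for k in range(4)) for j in range(4))
--                  for i in range(4))
--
-- def _mat_vec(A, v):
--     return tuple(sum(A[i][k] * v[k] for k in range(4)) for i in range(4))
--
-- def find_value_of_numbers(length_of_number):
--     if length_of_number <= 1:
--         return 8
--     M = ((0, 2, 2, 0),
--          (1, 0, 0, 2),
--          (1, 0, 0, 0),
--          (0, 1, 0, 0))
--     result = ((1, 0, 0, 0),
--               (0, 1, 0, 0),
--               (0, 0, 1, 0),
--               (0, 0, 0, 1))
--     base = M
--     e = length_of_number - 1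
--     while e > 0:
--         if e & 1:
--             result = _mat_mul(result, base)
--         base = _mat_mul(base, base)
--         e >>= 1
--     return sum(_mat_vec(result, (4, 2, 1, 0)))
-- ===== Notes on version B (the rewrite author's own statement) =====
-- stated objective: faster
-- what changed: Replaces the O(n) step-by-step state recurrence with binary exponentiation of the fixed 4x4 transition matrix applied to the initial state vector.
import Mathlib
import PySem

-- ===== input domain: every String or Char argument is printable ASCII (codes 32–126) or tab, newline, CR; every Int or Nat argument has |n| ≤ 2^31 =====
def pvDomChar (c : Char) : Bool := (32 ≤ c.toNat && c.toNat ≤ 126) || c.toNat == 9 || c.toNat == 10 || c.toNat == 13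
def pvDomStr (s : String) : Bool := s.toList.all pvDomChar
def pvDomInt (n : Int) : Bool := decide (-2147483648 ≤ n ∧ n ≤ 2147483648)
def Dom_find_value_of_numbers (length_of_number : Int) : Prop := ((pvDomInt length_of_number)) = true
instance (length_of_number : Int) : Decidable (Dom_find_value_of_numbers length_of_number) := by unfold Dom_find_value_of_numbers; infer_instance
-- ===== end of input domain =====

-- B replaces A's O(n) step-by-step recurrence by binary exponentiation of the fixed
-- 4x4 transition matrix (objective: faster, asymptotic O(log n)).

-- ===== PORT A =====
-- loop body of A: current[i] += ... from previos, then previos = copy(current)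
def pvStepA (previos : List Int) : List Int :=
  let c0 := 0 + PySem.List.pyGetD previos 1 0 * 2 + PySem.List.pyGetD previos 2 0 * 2
  let c1 := 0 + PySem.List.pyGetD previos 0 0 + PySem.List.pyGetD previos 3 0 * 2
  let c2 := 0 + PySem.List.pyGetD previos 0 0
  let c3 := 0 + PySem.List.pyGetD previos 1 0
  [c0, c1, c2, c3]

def find_value_of_numbers (length_of_number : Int) : Int :=
  let previos : List Int := [4, 2, 1, 0]
  if length_of_number > 1 then
    let previos := (PySem.List.pyRange 0 (length_of_number - 1) 1).foldl
      (fun p _ => pvStepA p) previos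
    previos.sum
  else
    8

-- ===== PORT B =====
abbrev pvQuad : Type := Int × Int × Int × Int
abbrev pvMat : Type := pvQuad × pvQuad × pvQuad × pvQuad

-- _mat_mul: 4x4 matrix product, the dot products written out
def pvMatMul (A B : pvMat) : pvMat :=
  ((A.1.1*B.1.1 + A.1.2.1*B.2.1.1 + A.1.2.2.1*B.2.2.1.1 + A.1.2.2.2*B.2.2.2.1,
    A.1.1*B.1.2.1 + A.1.2.1*B.2.1.2.1 + A.1.2.2.1*B.2.2.1.2.1 + A.1.2.2.2*B.2.2.2.2.1,
    A.1.1*B.1.2.2.1 + A.1.2.1*B.2.1.2.2.1 + A.1.2.2.1*B.2.2.1.2.2.1 + A.1.2.2.2*B.2.2.2.2.2.1,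
    A.1.1*B.1.2.2.2 + A.1.2.1*B.2.1.2.2.2 + A.1.2.2.1*B.2.2.1.2.2.2 + A.1.2.2.2*B.2.2.2.2.2.2),
   (A.2.1.1*B.1.1 + A.2.1.2.1*B.2.1.1 + A.2.1.2.2.1*B.2.2.1.1 + A.2.1.2.2.2*B.2.2.2.1,
    A.2.1.1*B.1.2.1 + A.2.1.2.1*B.2.1.2.1 + A.2.1.2.2.1*B.2.2.1.2.1 + A.2.1.2.2.2*B.2.2.2.2.1,
    A.2.1.1*B.1.2.2.1 + A.2.1.2.1*B.2.1.2.2.1 + A.2.1.2.2.1*B.2.2.1.2.2.1 + A.2.1.2.2.2*B.2.2.2.2.2.1,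
    A.2.1.1*B.1.2.2.2 + A.2.1.2.1*B.2.1.2.2.2 + A.2.1.2.2.1*B.2.2.1.2.2.2 + A.2.1.2.2.2*B.2.2.2.2.2.2),
   (A.2.2.1.1*B.1.1 + A.2.2.1.2.1*B.2.1.1 + A.2.2.1.2.2.1*B.2.2.1.1 + A.2.2.1.2.2.2*B.2.2.2.1,
    A.2.2.1.1*B.1.2.1 + A.2.2.1.2.1*B.2.1.2.1 + A.2.2.1.2.2.1*B.2.2.1.2.1 + A.2.2.1.2.2.2*B.2.2.2.2.1,
    A.2.2.1.1*B.1.2.2.1 + A.2.2.1.2.1*B.2.1.2.2.1 + A.2.2.1.2.2.1*B.2.2.1.2.2.1 + A.2.2.1.2.2.2*B.2.2.2.2.2.1,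
    A.2.2.1.1*B.1.2.2.2 + A.2.2.1.2.1*B.2.1.2.2.2 + A.2.2.1.2.2.1*B.2.2.1.2.2.2 + A.2.2.1.2.2.2*B.2.2.2.2.2.2),
   (A.2.2.2.1*B.1.1 + A.2.2.2.2.1*B.2.1.1 + A.2.2.2.2.2.1*B.2.2.1.1 + A.2.2.2.2.2.2*B.2.2.2.1,
    A.2.2.2.1*B.1.2.1 + A.2.2.2.2.1*B.2.1.2.1 + A.2.2.2.2.2.1*B.2.2.1.2.1 + A.2.2.2.2.2.2*B.2.2.2.2.1,
    A.2.2.2.1*B.1.2.2.1 + A.2.2.2.2.1*B.2.1.2.2.1 + A.2.2.2.2.2.1*B.2.2.1.2.2.1 + A.2.2.2.2.2.2*B.2.2.2.2.2.1,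
    A.2.2.2.1*B.1.2.2.2 + A.2.2.2.2.1*B.2.1.2.2.2 + A.2.2.2.2.2.1*B.2.2.1.2.2.2 + A.2.2.2.2.2.2*B.2.2.2.2.2.2))

-- _mat_vec: matrix times column vector
def pvMatVec (A : pvMat) (v : pvQuad) : pvQuad :=
  (A.1.1*v.1 + A.1.2.1*v.2.1 + A.1.2.2.1*v.2.2.1 + A.1.2.2.2*v.2.2.2,
   A.2.1.1*v.1 + A.2.1.2.1*v.2.1 + A.2.1.2.2.1*v.2.2.1 + A.2.1.2.2.2*v.2.2.2,
   A.2.2.1.1*v.1 + A.2.2.1.2.1*v.2.1 + A.2.2.1.2.2.1*v.2.2.1 + A.2.2.1.2.2.2*v.2.2.2,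
   A.2.2.2.1*v.1 + A.2.2.2.2.1*v.2.1 + A.2.2.2.2.2.1*v.2.2.1 + A.2.2.2.2.2.2*v.2.2.2)

-- the while loop of B: square-and-multiply
def pvPowLoop (result base : pvMat) (e : Nat) : pvMat :=
  if e = 0 then result
  else pvPowLoop (if e % 2 = 1 then pvMatMul result base else result) (pvMatMul base base) (e / 2)
termination_by e
decreasing_by exact Nat.div_lt_self (Nat.pos_of_ne_zero (by assumption)) (by omega)

def pvM : pvMat := ((0,2,2,0),(1,0,0,2),(1,0,0,0),(0,1,0,0))
def pvI : pvMat := ((1,0,0,0),(0,1,0,0),(0,0,1,0),(0,0,0,1))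

def find_value_of_numbers_alt (length_of_number : Int) : Int :=
  if length_of_number ≤ 1 then 8
  else
    let P := pvPowLoop pvI pvM (length_of_number - 1).toNat
    let v := pvMatVec P (4, 2, 1, 0)
    v.1 + v.2.1 + v.2.2.1 + v.2.2.2

-- ===== PRECONDITION & SPEC =====
def Spec_find_value_of_numbers (length_of_number : Int) (out : Int) : Prop := out = find_value_of_numbers_alt length_of_number
instance (length_of_number : Int) (out : Int) : Decidable (Spec_find_value_of_numbers length_of_number out) := by unfold Spec_find_value_of_numbers; infer_instance

-- ===== CLAIM (what is proved, stated in full; the proofs are below) =====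
def Claim_equal_find_value_of_numbers : Prop := ∀ (length_of_number : Int), Dom_find_value_of_numbers length_of_number → Spec_find_value_of_numbers length_of_number (find_value_of_numbers length_of_number)

-- ===== LEMMAS AND PROOFS =====

theorem pv_foldl_const {α β : Type} (l : List α) (f : β → β) (s : β) :
    l.foldl (fun p _ => f p) s = f^[l.length] s := by
  induction l generalizing s with
  | nil => rfl
  | cons x xs ih => simp [List.foldl, ih, Function.iterate_succ_apply]

theorem pv_matVec_mul (A B : pvMat) (v : pvQuad) :
    pvMatVec (pvMatMul A B) v = pvMatVec A (pvMatVec B v) := by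
  obtain ⟨⟨a00,a01,a02,a03⟩,⟨a10,a11,a12,a13⟩,⟨a20,a21,a22,a23⟩,⟨a30,a31,a32,a33⟩⟩ := A
  obtain ⟨⟨b00,b01,b02,b03⟩,⟨b10,b11,b12,b13⟩,⟨b20,b21,b22,b23⟩,⟨b30,b31,b32,b33⟩⟩ := B
  obtain ⟨x,y,z,w⟩ := v
  simp only [pvMatVec, pvMatMul, Prod.mk.injEq]
  refine ⟨by ring, by ring, by ring, by ring⟩

theorem pv_iter_sq (b : pvMat) (m : Nat) (v : pvQuad) :
    (pvMatVec (pvMatMul b b))^[m] v = (pvMatVec b)^[2*m] v := by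
  induction m generalizing v with
  | zero => rfl
  | succ m ih =>
    rw [Function.iterate_succ_apply, pv_matVec_mul, ih]
    have : 2 * (m + 1) = (2*m) + 1 + 1 := by omega
    rw [this, Function.iterate_succ_apply, Function.iterate_succ_apply]

theorem pv_powLoop_correct (e : Nat) : ∀ (r b : pvMat) (v : pvQuad),
    pvMatVec (pvPowLoop r b e) v = pvMatVec r ((pvMatVec b)^[e] v) := by
  induction e using Nat.strong_induction_on with
  | _ e ih =>
    intro r b v
    rw [pvPowLoop]
    by_cases h0 : e = 0
    · simp [h0]
    · simp only [h0, if_false]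
      rw [ih (e/2) (Nat.div_lt_self (Nat.pos_of_ne_zero h0) (by omega)), pv_iter_sq]
      by_cases hpar : e % 2 = 1
      · simp only [hpar, if_true]
        rw [pv_matVec_mul]
        have he : e = 2 * (e/2) + 1 := by omega
        conv_rhs => rw [he]
        rw [Function.iterate_succ_apply']
      · simp only [hpar, if_false]
        have he : 2 * (e/2) = e := by omega
        rw [he]

theorem pv_matVec_I (v : pvQuad) : pvMatVec pvI v = v := by
  obtain ⟨x,y,z,w⟩ := v
  simp only [pvMatVec, pvI, Prod.mk.injEq]
  refine ⟨by ring, by ring, by ring, by ring⟩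

theorem pv_step_corresp (k : Nat) (a b c d : Int) :
    pvStepA^[k] [a, b, c, d] =
      [((pvMatVec pvM)^[k] (a,b,c,d)).1, ((pvMatVec pvM)^[k] (a,b,c,d)).2.1,
       ((pvMatVec pvM)^[k] (a,b,c,d)).2.2.1, ((pvMatVec pvM)^[k] (a,b,c,d)).2.2.2] := by
  induction k generalizing a b c d with
  | zero => rfl
  | succ k ih =>
    rw [Function.iterate_succ_apply, Function.iterate_succ_apply]
    have hstep : pvStepA [a, b, c, d] = [2*b + 2*c, a + 2*d, a, b] := by
      have g0 : PySem.List.pyGetD [a,b,c,d] 0 0 = a := by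
        rw [PySem.List.pyGetD_eq_getElem] <;> simp
      have g1 : PySem.List.pyGetD [a,b,c,d] 1 0 = b := by
        rw [PySem.List.pyGetD_eq_getElem] <;> simp
      have g2 : PySem.List.pyGetD [a,b,c,d] 2 0 = c := by
        rw [PySem.List.pyGetD_eq_getElem] <;> simp [show (2:Int).toNat = 2 from rfl]
      have g3 : PySem.List.pyGetD [a,b,c,d] 3 0 = d := by
        rw [PySem.List.pyGetD_eq_getElem] <;> simp [show (3:Int).toNat = 3 from rfl]
      simp only [pvStepA, g0, g1, g2, g3, List.cons.injEq, and_true]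
      omega
    have hM : pvMatVec pvM (a,b,c,d) = (2*b + 2*c, a + 2*d, a, b) := by
      simp only [pvMatVec, pvM, Prod.mk.injEq]
      refine ⟨by ring, by ring, by ring, by ring⟩
    rw [hstep, hM, ih]

-- ===== VERDICT (by name: the statement is the Claim_ definition above) =====
theorem find_value_of_numbers_spec : Claim_equal_find_value_of_numbers := by
  intro n _
  unfold Spec_find_value_of_numbers find_value_of_numbers find_value_of_numbers_alt
  by_cases h : n > 1
  · simp only [h, if_true, show ¬ (n ≤ 1) by omega, if_false]
    rw [pv_foldl_const, PySem.List.length_pyRange_one]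
    have h1 : (n - 1 - 0).toNat = (n - 1).toNat := by omega
    rw [h1, pv_step_corresp, pv_powLoop_correct, pv_matVec_I]
    simp [List.sum]
    ring
  · simp only [h, if_false, show n ≤ 1 by omega, if_true]
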